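-- pv_equiv track=rewrite | github.com/waternflame/2026bigdata01 | ticket.py | entrance_fee
-- ===== SOURCE A (Python) =====
-- def entrance_fee(ages: list) -> int:
--     """
--     Calculates the total admission fee for a group based on their ages.
--
--     Args:
--         ages (list): A list of ages for the visitors.
--
--     Returns:
--         int: The total calculated entry fee for the amusement park.
--     """
--
--     kid, adult, senior = 5000, 10000, 7000
--     total_fee = 0
--     for age in ages:
--         if age >= 65:
--             total_fee = total_fee + senior
--         elif age >= 19:
--             total_fee = total_fee + adult
--         else:
--             total_fee = total_fee + kid
--     return total_fee
-- ===== SOURCE B (Python) =====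
-- def entrance_fee(ages: list) -> int:
--     # Branch-free: cumulative threshold counts + telescoping fee increments.
--     # kid=5000 for everyone; +5000 more for age>=19 (adult=10000); -3000 for age>=65 (senior=7000).
--     n = len(ages)
--     at_least_adult = sum(1 for a in ages if a >= 19)
--     seniors = sum(1 for a in ages if a >= 65)
--     return 5000 * n + 5000 * at_least_adult - 3000 * seniors
-- ===== Notes on version B (the rewrite author's own statement) =====
-- stated objective: alternative
-- what changed: B eliminates the per-element if/elif chain: it computes cumulative threshold counts (len, count of age>=19, count of age>=65) in staged passes and combines them with the telescoping identity 5000*n + 5000*|age>=19| - 3000*|age>=65|, correct because an adult pays 5000 more than a kid and a senior 3000 less than an adult.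
import Mathlib
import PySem

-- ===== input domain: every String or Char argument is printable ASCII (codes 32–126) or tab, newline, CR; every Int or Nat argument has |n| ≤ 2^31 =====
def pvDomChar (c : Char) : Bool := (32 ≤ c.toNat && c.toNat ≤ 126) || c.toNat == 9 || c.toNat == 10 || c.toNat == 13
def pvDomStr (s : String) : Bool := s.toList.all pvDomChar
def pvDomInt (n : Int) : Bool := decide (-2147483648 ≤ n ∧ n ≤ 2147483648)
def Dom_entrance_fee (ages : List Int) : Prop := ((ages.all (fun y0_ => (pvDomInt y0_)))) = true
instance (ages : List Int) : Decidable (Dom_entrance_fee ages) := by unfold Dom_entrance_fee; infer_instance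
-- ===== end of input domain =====

-- B replaces the per-element if/elif chain by staged threshold counts combined with the telescoping identity 5000*n + 5000*|age>=19| - 3000*|age>=65| (alternative decomposition, same cost).


-- ===== PORT A =====
def entrance_fee (ages : List Int) : Int :=
  let kid : Int := 5000
  let adult : Int := 10000
  let senior : Int := 7000
  ages.foldl (fun total_fee age =>
    if age ≥ 65 then total_fee + senior
    else if age ≥ 19 then total_fee + adult
    else total_fee + kid) 0

-- ===== PORT B =====
def entrance_fee_alt (ages : List Int) : Int :=
  let n : Int := ages.length
  let at_least_adult : Int := ages.countP (fun a => decide (a ≥ 19))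
  let seniors : Int := ages.countP (fun a => decide (a ≥ 65))
  5000 * n + 5000 * at_least_adult - 3000 * seniors

-- ===== PRECONDITION & SPEC =====
def Spec_entrance_fee (ages : List Int) (out : Int) : Prop := out = entrance_fee_alt ages
instance (ages : List Int) (out : Int) : Decidable (Spec_entrance_fee ages out) := by unfold Spec_entrance_fee; infer_instance

-- ===== CLAIM (what is proved, stated in full; the proofs are below) =====
def Claim_equal_entrance_fee : Prop := ∀ (ages : List Int), Dom_entrance_fee ages → Spec_entrance_fee ages (entrance_fee ages)

-- ===== LEMMAS AND PROOFS =====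
lemma fee_counts (ages : List Int) (t : Int) :
    ages.foldl (fun total_fee age =>
      if age ≥ 65 then total_fee + 7000
      else if age ≥ 19 then total_fee + 10000
      else total_fee + 5000) t
    = t + 5000 * (ages.length : Int)
        + 5000 * (ages.countP (fun a => decide (a ≥ 19)) : Int)
        - 3000 * (ages.countP (fun a => decide (a ≥ 65)) : Int) := by
  induction ages generalizing t with
  | nil => simp
  | cons x xs ih =>
    simp only [List.foldl_cons, List.length_cons, List.countP_cons, ih]
    split_ifs with h1 h2 <;>
      simp_all [decide_eq_true_eq] <;> omega

-- ===== VERDICT (by name: the statement is the Claim_ definition above) =====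
theorem entrance_fee_spec : Claim_equal_entrance_fee := by
  intro ages _
  unfold Spec_entrance_fee entrance_fee entrance_fee_alt
  simpa using fee_counts ages 0
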